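-- pv_equiv track=rewrite | github.com/isabellacarrero-baptista/inst326_final_project | error_function.py | playable_cards
-- ===== SOURCE A (Python) =====
-- rank_value = {
--     '2': 2,
--     '3': 3,
--     '4': 4,
--     '5': 5,
--     '6': 6,
--     '7': 7,
--     '8': 8,
--     '9': 9,
--     '10': 10,
--     'Jack': 11,
--     'Queen': 12,
--     'King': 13,
--     'Ace': 1
-- }
--
-- def playable_cards(spit_piles, faceup_cards, top_spitcard):
--
--     #dictionary for each legal play the player can make
--     legal_plays_dict = {}
--
--     #outlines in what order cards can be placed
--     #cards have to be one number above or below each other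
--     #Ace can equal both 1 and 13
--     def legal_plays(card_val, spit_val):
--         return (
--             abs(card_val - spit_val) == 1 or
--             (card_val == 1 and spit_val == 13) or
--             (card_val == 13 and spit_val == 1)
--         )
--
--     #a list of the top cards in the spit pile in numerical values
--     spit_vals = [rank_value[card[0]] for card in spit_piles]
--
--     #checks top face up cards in the 5 spit piles
--     for index, card in enumerate(faceup_cards):
--         if card == None:
--             continue
--         card_val = rank_value[card[0]]
--         for spit_index, spit_val in enumerate(spit_vals):
--             if legal_plays(card_val, spit_val):
--                 key = f"pile {index+1}"
--                 if key not in legal_plays_dict: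
--                     legal_plays_dict[key] = []
--                 legal_plays_dict[key].append(spit_index + 1)
--
--     #check top face down card on the player's spit stack they draw from
--     if top_spitcard:
--         spit_card_val = rank_value[top_spitcard[0]]
--         for spit_index, spit_val in enumerate(spit_vals):
--             if legal_plays(spit_card_val, spit_val):
--                 key = "spit"
--                 if key not in legal_plays_dict:
--                     legal_plays_dict[key] = []
--                 legal_plays_dict[key].append(spit_index + 1)
--
--     #raises an error telling the player they can't place a card there
--     if not legal_plays_dict:
--         raise Exception("That is an invalid play!")
--
--     return legal_plays_dict
-- ===== SOURCE B (Python) =====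
-- rank_value = {
--     '2': 2, '3': 3, '4': 4, '5': 5, '6': 6, '7': 7, '8': 8, '9': 9,
--     '10': 10, 'Jack': 11, 'Queen': 12, 'King': 13, 'Ace': 1
-- }
--
-- def playable_cards(spit_piles, faceup_cards, top_spitcard):
--     # index the spit piles once by top-card value -> ascending 1-based pile indices
--     by_value = {}
--     for i, pile in enumerate(spit_piles, start=1):
--         by_value.setdefault(rank_value[pile[0]], []).append(i)
--
--     def targets(v):
--         t = [v - 1, v + 1]
--         if v == 1:
--             t.append(13)
--         if v == 13:
--             t.append(1)
--         return t
--
--     def gather(v):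
--         return sorted(x for t in targets(v) for x in by_value.get(t, []))
--
--     legal_plays_dict = {}
--     for i, card in enumerate(faceup_cards, start=1):
--         if card is None:
--             continue
--         idxs = gather(rank_value[card[0]])
--         if idxs:
--             legal_plays_dict[f"pile {i}"] = idxs
--
--     if top_spitcard:
--         idxs = gather(rank_value[top_spitcard[0]])
--         if idxs:
--             legal_plays_dict["spit"] = idxs
--
--     if not legal_plays_dict:
--         raise Exception("That is an invalid play!")
--
--     return legal_plays_dict
-- ===== Notes on version B (the rewrite author's own statement) =====
-- stated objective: alternative
-- what changed: B indexes the spit piles once into a value->indices map and, for each card, merges and sorts the buckets of its up-to-four target values, instead of A's rescan of all spit piles per card with a setdefault/append dict protocol.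
import Mathlib
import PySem

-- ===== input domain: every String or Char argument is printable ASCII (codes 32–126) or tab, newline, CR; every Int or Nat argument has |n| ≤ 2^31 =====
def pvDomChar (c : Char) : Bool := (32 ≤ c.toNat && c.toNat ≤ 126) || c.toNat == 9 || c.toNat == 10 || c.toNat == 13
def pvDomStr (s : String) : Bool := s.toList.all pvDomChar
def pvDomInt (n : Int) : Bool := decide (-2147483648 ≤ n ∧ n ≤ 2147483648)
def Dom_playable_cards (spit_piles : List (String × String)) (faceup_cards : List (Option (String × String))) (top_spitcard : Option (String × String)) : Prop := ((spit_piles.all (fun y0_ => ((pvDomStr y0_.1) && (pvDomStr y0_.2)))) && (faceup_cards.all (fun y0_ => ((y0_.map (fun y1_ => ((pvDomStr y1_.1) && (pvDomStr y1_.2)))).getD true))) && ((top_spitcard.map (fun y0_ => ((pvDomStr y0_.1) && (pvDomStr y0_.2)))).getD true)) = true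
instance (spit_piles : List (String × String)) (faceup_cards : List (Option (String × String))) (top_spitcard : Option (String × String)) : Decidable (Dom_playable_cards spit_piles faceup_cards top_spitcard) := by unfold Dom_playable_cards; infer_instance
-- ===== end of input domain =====

-- B replaces A's per-card rescan of the spit piles by a value→indices map built once,
-- gathering and sorting the buckets of each card's target values (alternative decomposition, same results).
-- Note: the Python functions raise (KeyError on an unknown rank, Exception when no play exists);
-- those inputs are excluded by Pre_ below, where the ports simply return the (empty) association list.

-- ===== PORT A =====
-- the module constant rank_value (shared by both ports)
def rankValue : PySem.Dict String Int :=
  ⟨[("2",2),("3",3),("4",4),("5",5),("6",6),("7",7),("8",8),("9",9),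
    ("10",10),("Jack",11),("Queen",12),("King",13),("Ace",1)]⟩

-- A's nested helper legal_plays
def legalPlays (card_val spit_val : Int) : Bool :=
  ((card_val - spit_val).natAbs == 1) || (card_val == 1 && spit_val == 13) || (card_val == 13 && spit_val == 1)

-- f"pile {n}" (shared by both ports)
def pileKey (n : Int) : String := "pile " ++ PySem.Int.toStr n

def playable_cards (spit_piles : List (String × String)) (faceup_cards : List (Option (String × String))) (top_spitcard : Option (String × String)) : List (String × List Int) :=
  let spit_vals := spit_piles.map (fun card => rankValue.getD card.1 0)
  let d := (PySem.List.enumerate faceup_cards 0).foldl (fun d ic =>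
    match ic.2 with
    | none => d
    | some card =>
      let card_val := rankValue.getD card.1 0
      (PySem.List.enumerate spit_vals 0).foldl (fun d sv =>
        if legalPlays card_val sv.2 then
          let key := pileKey (ic.1 + 1)
          let d' := if d.contains key then d else d.insert key []
          d'.modify key [] (fun l => l ++ [sv.1 + 1])
        else d) d) PySem.Dict.empty
  let d := match top_spitcard with
    | none => d
    | some tc =>
      let spit_card_val := rankValue.getD tc.1 0
      (PySem.List.enumerate spit_vals 0).foldl (fun d (sv : Int × Int) =>
        if legalPlays spit_card_val sv.2 then
          let d' := if d.contains "spit" then d else d.insert "spit" []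
          d'.modify "spit" [] (fun l => l ++ [sv.1 + 1])
        else d) d
  d.items

-- ===== PORT B =====
def targetsOf (v : Int) : List Int :=
  ([v - 1, v + 1] ++ (if v == 1 then [13] else [])) ++ (if v == 13 then [1] else [])

def playable_cards_alt (spit_piles : List (String × String)) (faceup_cards : List (Option (String × String))) (top_spitcard : Option (String × String)) : List (String × List Int) :=
  let byValue := (PySem.List.enumerate spit_piles 1).foldl
    (fun d p => d.modify (rankValue.getD p.2.1 0) [] (fun l => l ++ [p.1])) PySem.Dict.empty
  let gather := fun (v : Int) =>
    PySem.List.sorted ((targetsOf v).flatMap (fun t => byValue.getD t [])) id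
  let d := (PySem.List.enumerate faceup_cards 1).foldl (fun d ic =>
    match ic.2 with
    | none => d
    | some card =>
      let idxs := gather (rankValue.getD card.1 0)
      if idxs.isEmpty then d else d.insert (pileKey ic.1) idxs) PySem.Dict.empty
  let d := match top_spitcard with
    | none => d
    | some tc =>
      let idxs := gather (rankValue.getD tc.1 0)
      if idxs.isEmpty then d else d.insert "spit" idxs
  d.items

-- ===== PRECONDITION & SPEC =====
-- Pre_ excludes exactly the inputs where the Python raises: a rank string outside rank_value
-- (KeyError) and positions with no legal play at all (the explicit raise Exception).
def Pre_playable_cards (spit_piles : List (String × String)) (faceup_cards : List (Option (String × String))) (top_spitcard : Option (String × String)) : Prop :=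
  (∀ p ∈ spit_piles, rankValue.contains p.1 = true) ∧
  (∀ c ∈ faceup_cards, ∀ p, c = some p → rankValue.contains p.1 = true) ∧
  (∀ p, top_spitcard = some p → rankValue.contains p.1 = true) ∧
  ((∃ c ∈ faceup_cards, ∃ p, c = some p ∧ ∃ q ∈ spit_piles,
      legalPlays (rankValue.getD p.1 0) (rankValue.getD q.1 0) = true) ∨
   (∃ p, top_spitcard = some p ∧ ∃ q ∈ spit_piles,
      legalPlays (rankValue.getD p.1 0) (rankValue.getD q.1 0) = true))
instance (spit_piles : List (String × String)) (faceup_cards : List (Option (String × String))) (top_spitcard : Option (String × String)) : Decidable (Pre_playable_cards spit_piles faceup_cards top_spitcard) := by unfold Pre_playable_cards; infer_instance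

def pvWitness_playable_cards : (List (String × String)) × (List (Option (String × String))) × (Option (String × String)) :=
  ([("5","h"), ("9","s")], [some ("4","s"), none], some ("10","d"))

def Spec_playable_cards (spit_piles : List (String × String)) (faceup_cards : List (Option (String × String))) (top_spitcard : Option (String × String)) (out : List (String × List Int)) : Prop := out = playable_cards_alt spit_piles faceup_cards top_spitcard
instance (spit_piles : List (String × String)) (faceup_cards : List (Option (String × String))) (top_spitcard : Option (String × String)) (out : List (String × List Int)) : Decidable (Spec_playable_cards spit_piles faceup_cards top_spitcard out) := by unfold Spec_playable_cards; infer_instance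

-- ===== CLAIM (what is proved, stated in full; the proofs are below) =====
def Claim_equal_playable_cards : Prop := ∀ (spit_piles : List (String × String)) (faceup_cards : List (Option (String × String))) (top_spitcard : Option (String × String)), Dom_playable_cards spit_piles faceup_cards top_spitcard → Pre_playable_cards spit_piles faceup_cards top_spitcard → Spec_playable_cards spit_piles faceup_cards top_spitcard (playable_cards spit_piles faceup_cards top_spitcard)

-- ===== LEMMAS AND PROOFS =====

theorem pvWitness_ok :
    Dom_playable_cards pvWitness_playable_cards.1 pvWitness_playable_cards.2.1 pvWitness_playable_cards.2.2 ∧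
    Pre_playable_cards pvWitness_playable_cards.1 pvWitness_playable_cards.2.1 pvWitness_playable_cards.2.2 := by
  decide

-- ---- digits: str(n) is injective on nonnegative ints ----
def pvDec (cs : List Char) : Nat := cs.foldl (fun a c => 10 * a + (c.toNat - 48)) 0

theorem pvToDigitsCore_append : ∀ (f n : Nat) (l : List Char),
    Nat.toDigitsCore 10 f n l = Nat.toDigitsCore 10 f n [] ++ l := by
  intro f
  induction f with
  | zero => intro n l; simp [Nat.toDigitsCore]
  | succ f ih =>
    intro n l
    simp only [Nat.toDigitsCore]
    by_cases h : n / 10 = 0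
    · simp [h]
    · simp only [h, if_false]
      rw [ih (n/10) (Nat.digitChar (n % 10) :: l), ih (n/10) [Nat.digitChar (n % 10)]]
      simp

theorem pvDigitChar_toNat {r : Nat} (h : r < 10) : (Nat.digitChar r).toNat - 48 = r := by
  interval_cases r <;> decide

theorem pvDec_toDigitsCore : ∀ (f n : Nat), n < f → pvDec (Nat.toDigitsCore 10 f n []) = n := by
  intro f
  induction f with
  | zero => omega
  | succ f ih =>
    intro n hn
    simp only [Nat.toDigitsCore]
    by_cases h : n / 10 = 0
    · simp only [h, if_true]
      have : n < 10 := by omega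
      rw [Nat.mod_eq_of_lt this]
      simp only [pvDec, List.foldl]
      have := pvDigitChar_toNat this
      omega
    · simp only [h, if_false]
      rw [pvToDigitsCore_append]
      have h0 : 0 < n := by
        rcases Nat.eq_zero_or_pos n with h'|h'
        · exfalso; apply h; simp [h']
        · exact h'
      have hlt : n / 10 < f := by
        have := Nat.div_lt_self h0 (by norm_num : 1 < 10)
        omega
      have := ih (n/10) hlt
      simp only [pvDec] at *
      rw [List.foldl_append]
      simp only [List.foldl]
      rw [this, pvDigitChar_toNat (Nat.mod_lt n (by norm_num))]
      omega

theorem pvToDigits10_inj {m n : Nat} (h : Nat.toDigits 10 m = Nat.toDigits 10 n) : m = n := by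
  have hm := pvDec_toDigitsCore (m+1) m (by omega)
  have hn := pvDec_toDigitsCore (n+1) n (by omega)
  unfold Nat.toDigits at h
  rw [h] at hm
  omega

theorem pvToStr_toList (n : Int) : (PySem.Int.toStr n).toList = PySem.Int.toChars n := by
  simp [PySem.Int.toList_toStr]

theorem pvPileKey_inj {a b : Int} (ha : 0 ≤ a) (hb : 0 ≤ b) (h : pileKey a = pileKey b) : a = b := by
  have h2 : (pileKey a).toList = (pileKey b).toList := by rw [h]
  simp only [pileKey, String.toList_append, pvToStr_toList] at h2
  have h3 : PySem.Int.toChars a = PySem.Int.toChars b := List.append_cancel_left h2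
  simp only [PySem.Int.toChars, if_neg (by omega : ¬ a < 0), if_neg (by omega : ¬ b < 0)] at h3
  have := pvToDigits10_inj h3
  omega

theorem pvSpit_ne_pileKey (n : Int) : "spit" ≠ pileKey n := by
  intro h
  have h2 : (String.toList "spit") = (pileKey n).toList := by rw [h]
  simp only [pileKey, String.toList_append, pvToStr_toList] at h2
  have : (String.toList "spit").take 5 = (String.toList "pile " ++ PySem.Int.toChars n).take 5 := by rw [h2]
  simp at this

-- ---- enumerate ----
theorem pvEnum_cons {α : Type} (x : α) (xs : List α) (k : Int) :
    PySem.List.enumerate (x :: xs) k = (k, x) :: PySem.List.enumerate xs (k + 1) := by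
  simp [PySem.List.enumerate]

theorem pvEnum_nil {α : Type} (k : Int) : PySem.List.enumerate ([] : List α) k = [] := by
  simp [PySem.List.enumerate]

theorem pvEnum_map {α β : Type} (f : α → β) : ∀ (xs : List α) (k : Int),
    PySem.List.enumerate (xs.map f) k = (PySem.List.enumerate xs k).map (fun p => (p.1, f p.2)) := by
  intro xs
  induction xs with
  | nil => intro k; simp [pvEnum_nil]
  | cons x xs ih => intro k; simp [pvEnum_cons, ih]

theorem pvEnum_le {α : Type} : ∀ (xs : List α) (k : Int), ∀ p ∈ PySem.List.enumerate xs k, k ≤ p.1 := by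
  intro xs
  induction xs with
  | nil => intro k p hp; simp [pvEnum_nil] at hp
  | cons x xs ih =>
    intro k p hp
    rw [pvEnum_cons, List.mem_cons] at hp
    rcases hp with h | h
    · simp [h]
    · have := ih (k+1) p h; omega

theorem pvEnum_pairwise {α : Type} : ∀ (xs : List α) (k : Int),
    (PySem.List.enumerate xs k).Pairwise (fun a b => a.1 < b.1) := by
  intro xs
  induction xs with
  | nil => intro k; simp [pvEnum_nil]
  | cons x xs ih =>
    intro k
    rw [pvEnum_cons]
    refine List.Pairwise.cons ?_ (ih (k+1))
    intro p hp
    have := pvEnum_le xs (k+1) p hp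
    simp; omega

theorem pvEnum_shift {α : Type} (q : α → Bool) : ∀ (xs : List α) (k : Int),
    ((PySem.List.enumerate xs k).filter (fun p => q p.2)).map (fun p => p.1 + 1) =
    ((PySem.List.enumerate xs (k + 1)).filter (fun p => q p.2)).map (fun p => p.1) := by
  intro xs
  induction xs with
  | nil => intro k; simp [pvEnum_nil]
  | cons x xs ih =>
    intro k
    rw [pvEnum_cons, pvEnum_cons]
    by_cases h : q x
    · simp only [List.filter_cons, h, if_true, List.map_cons]
      rw [ih (k+1)]
    · simp only [List.filter_cons, h]
      simpa using ih (k+1)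

-- ---- A's inner loop over the spit piles, at a fresh key, is a single insert ----
theorem pvStepA_present (items0 : List (String × List Int)) (key : String) (v : List Int) (i : Int)
    (h : ∀ p ∈ items0, (p.1 == key) = false) :
    (let d : PySem.Dict String (List Int) := ⟨items0 ++ [(key, v)]⟩
     let d' := if d.contains key then d else d.insert key []
     d'.modify key [] (fun l => l ++ [i])) = (⟨items0 ++ [(key, v ++ [i])]⟩ : PySem.Dict String (List Int)) := by
  have hc : (PySem.Dict.mk (items0 ++ [(key, v)])).contains key = true := by
    simp [PySem.Dict.contains, List.any_append]
  simp only [hc, if_true]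
  have hg : (PySem.Dict.mk (items0 ++ [(key, v)])).get? key = some v := by
    simp only [PySem.Dict.get?, List.find?_append]
    rw [List.find?_eq_none.mpr (by intro p hp; simp [h p hp])]
    simp
  simp only [PySem.Dict.modify, PySem.Dict.getD, hg, Option.getD_some, PySem.Dict.insert, hc, if_true]
  congr 1
  simp only [List.map_append]
  congr 1
  · rw [show items0.map (fun p => if (p.1 == key) = true then (key, v ++ [i]) else p) = items0.map id from
        List.map_congr_left (fun p hp => by simp [h p hp]), List.map_id]
  · simp

theorem pvInnerA_present (cv : Int) (key : String) :
    ∀ (l : List (Int × Int)) (items0 : List (String × List Int)) (v : List Int),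
    (∀ p ∈ items0, (p.1 == key) = false) →
    l.foldl (fun (d : PySem.Dict String (List Int)) (sv : Int × Int) =>
        if legalPlays cv sv.2 then
          let d' := if d.contains key then d else d.insert key []
          d'.modify key [] (fun l => l ++ [sv.1 + 1])
        else d) ⟨items0 ++ [(key, v)]⟩ =
    ⟨items0 ++ [(key, v ++ (l.filter (fun sv => legalPlays cv sv.2)).map (fun sv => sv.1 + 1))]⟩ := by
  intro l
  induction l with
  | nil => intro items0 v h; simp
  | cons a l ih =>
    intro items0 v h
    simp only [List.foldl_cons, List.filter_cons]
    by_cases ha : legalPlays cv a.2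
    · simp only [ha, if_true]
      rw [pvStepA_present items0 key v (a.1 + 1) h, ih items0 (v ++ [a.1 + 1]) h]
      simp
    · simp only [ha, Bool.false_eq_true, if_false]
      exact ih items0 v h

theorem pvInnerA_fresh (cv : Int) (key : String) (l : List (Int × Int)) (d : PySem.Dict String (List Int))
    (h : d.contains key = false) :
    l.foldl (fun (d : PySem.Dict String (List Int)) (sv : Int × Int) =>
        if legalPlays cv sv.2 then
          let d' := if d.contains key then d else d.insert key []
          d'.modify key [] (fun l => l ++ [sv.1 + 1])
        else d) d =
    (let hits := (l.filter (fun sv => legalPlays cv sv.2)).map (fun sv => sv.1 + 1)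
     if hits.isEmpty then d else d.insert key hits) := by
  have hkeys : ∀ p ∈ d.items, (p.1 == key) = false := by
    intro p hp
    by_contra hx
    simp only [PySem.Dict.contains] at h
    rw [List.any_eq_false] at h
    exact (h p hp) (by revert hx; cases (p.1 == key) <;> simp)
  induction l with
  | nil => simp
  | cons a l ih =>
    simp only [List.foldl_cons, List.filter_cons]
    by_cases ha : legalPlays cv a.2
    · simp only [ha, if_true]
      have step1 : (let d' := if d.contains key then d else d.insert key []
          d'.modify key [] (fun l => l ++ [a.1 + 1])) = (⟨d.items ++ [(key, [a.1 + 1])]⟩ : PySem.Dict String (List Int)) := by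
        simp only [h, Bool.false_eq_true, if_false, PySem.Dict.insert, h]
        have := pvStepA_present d.items key [] (a.1 + 1) hkeys
        simp only [PySem.Dict.contains, PySem.Dict.items] at this ⊢
        simpa using this
      rw [step1, pvInnerA_present cv key l d.items [a.1 + 1] hkeys]
      simp only [List.map_cons, List.isEmpty_cons, if_false]
      rw [show (d.insert key ((a.1+1) :: (l.filter (fun sv => legalPlays cv sv.2)).map (fun sv => sv.1 + 1))) =
          (⟨d.items ++ [(key, (a.1+1) :: (l.filter (fun sv => legalPlays cv sv.2)).map (fun sv => sv.1 + 1))]⟩ : PySem.Dict String (List Int)) from by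
        simp only [PySem.Dict.insert, h, Bool.false_eq_true, if_false]]
      simp
    · simp only [ha, Bool.false_eq_true, if_false]
      exact ih

-- ---- B's gather equals A's scan ----
theorem pvLegal_mem_targets (cv v : Int) : legalPlays cv v = true ↔ v ∈ targetsOf cv := by
  by_cases h1 : cv = 1 <;> by_cases h13 : cv = 13 <;>
    simp [legalPlays, targetsOf, h1, h13] <;> omega

theorem pvTargets_nodup (cv : Int) : (targetsOf cv).Nodup := by
  by_cases h1 : cv = 1 <;> by_cases h13 : cv = 13 <;>
    simp [targetsOf, h1, h13] <;> omega

theorem pvFlatPerm : ∀ (ts : List Int), ts.Nodup → ∀ (E : List (Int × Int)),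
    (ts.flatMap (fun t => E.filter (fun p => p.2 == t))).Perm (E.filter (fun p => decide (p.2 ∈ ts))) := by
  intro ts hnd E
  rw [List.perm_iff_count]
  intro a
  rw [List.count_flatMap]
  have hcount : ∀ t : Int, List.count a (E.filter (fun p => p.2 == t)) =
      if a.2 = t then List.count a E else 0 := by
    intro t
    by_cases h : a.2 = t
    · rw [if_pos h, List.count_filter (by simp [h])]
    · rw [if_neg h, List.count_eq_zero]
      intro hm
      rw [List.mem_filter] at hm
      exact h (by simpa using hm.2)
  have hright : List.count a (E.filter (fun p => decide (p.2 ∈ ts))) =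
      if a.2 ∈ ts then List.count a E else 0 := by
    by_cases h : a.2 ∈ ts
    · rw [if_pos h, List.count_filter (by simp [h])]
    · rw [if_neg h, List.count_eq_zero]
      intro hm
      rw [List.mem_filter] at hm
      exact h (by simpa using hm.2)
  rw [hright]
  clear hright
  induction ts with
  | nil => simp
  | cons t ts ih =>
    rw [List.nodup_cons] at hnd
    simp only [List.map_cons, List.sum_cons, Function.comp_apply, hcount, List.mem_cons]
    rw [ih hnd.2]
    by_cases h : a.2 = t
    · simp [h, hnd.1]
    · simp [h]

def svalsOf (sp : List (String × String)) : List Int := sp.map (fun card => rankValue.getD card.1 0)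

def byValueOf (sp : List (String × String)) : PySem.Dict Int (List Int) :=
  (PySem.List.enumerate sp 1).foldl
    (fun d p => d.modify (rankValue.getD p.2.1 0) [] (fun l => l ++ [p.1])) PySem.Dict.empty

def hitsOf (sp : List (String × String)) (cv : Int) : List Int :=
  ((PySem.List.enumerate (svalsOf sp) 1).filter (fun p => legalPlays cv p.2)).map (fun p => p.1)

theorem pvBucket_eq (sp : List (String × String)) (t : Int) :
    (byValueOf sp).getD t [] =
    ((PySem.List.enumerate (svalsOf sp) 1).filter (fun p => p.2 == t)).map (fun p => p.1) := by
  have h1 : byValueOf sp =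
      ((PySem.List.enumerate sp 1).map (fun p => (rankValue.getD p.2.1 0, p.1))).foldl
        (fun d p => d.modify p.1 [] (fun l => l ++ [p.2])) PySem.Dict.empty := by
    rw [List.foldl_map]
    rfl
  rw [h1, PySem.Dict.getD_foldl_modify_append]
  have hemp : (PySem.Dict.empty : PySem.Dict Int (List Int)).getD t [] = [] := by rfl
  rw [hemp, List.nil_append]
  rw [svalsOf, pvEnum_map]
  simp [List.filter_map, List.map_map, Function.comp_def]

theorem pvGather_eq (sp : List (String × String)) (cv : Int) :
    PySem.List.sorted ((targetsOf cv).flatMap (fun t => (byValueOf sp).getD t [])) id = hitsOf sp cv := by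
  apply PySem.List.sorted_eq_of_perm_of_pairwise_lt
  · have hb : (targetsOf cv).flatMap (fun t => (byValueOf sp).getD t []) =
        ((targetsOf cv).flatMap (fun t => (PySem.List.enumerate (svalsOf sp) 1).filter (fun p => p.2 == t))).map (fun p => p.1) := by
      rw [List.map_flatMap]
      simp only [pvBucket_eq]
    rw [hb]
    apply List.Perm.map
    apply List.Perm.symm
    have hperm := pvFlatPerm (targetsOf cv) (pvTargets_nodup cv) (PySem.List.enumerate (svalsOf sp) 1)
    have hfc : (PySem.List.enumerate (svalsOf sp) 1).filter (fun p => decide (p.2 ∈ targetsOf cv)) =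
        (PySem.List.enumerate (svalsOf sp) 1).filter (fun p => legalPlays cv p.2) := by
      apply List.filter_congr
      intro p _
      by_cases hl : legalPlays cv p.2
      · simp_all [pvLegal_mem_targets]
      · have hm : p.2 ∉ targetsOf cv := fun hm =>
          absurd ((pvLegal_mem_targets cv p.2).mpr hm) hl
        simp only [Bool.not_eq_true] at hl
        simp [hm, hl]
    rw [hfc] at hperm
    exact hperm
  · unfold hitsOf
    rw [List.pairwise_map]
    apply List.Pairwise.filter
    exact pvEnum_pairwise _ 1

-- ---- the common shape of both outer loops ----
def buildD (sp : List (String × String)) :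
    List (Option (String × String)) → Nat → PySem.Dict String (List Int) → PySem.Dict String (List Int)
  | [], _, d => d
  | none :: fc, k, d => buildD sp fc (k+1) d
  | some c :: fc, k, d =>
      let h := hitsOf sp (rankValue.getD c.1 0)
      buildD sp fc (k+1) (if h.isEmpty then d else d.insert (pileKey ((k+1 : Nat) : Int)) h)

def pvGood (k : Nat) (d : PySem.Dict String (List Int)) : Prop :=
  ∀ s ∈ d.items, ∃ j : Nat, 0 < j ∧ j ≤ k ∧ s.1 = pileKey (j : Int)

theorem pvGood_mono {k k' : Nat} (h : k ≤ k') {d : PySem.Dict String (List Int)} (hg : pvGood k d) :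
    pvGood k' d := by
  intro s hs
  obtain ⟨j, h1, h2, h3⟩ := hg s hs
  exact ⟨j, h1, by omega, h3⟩

theorem pvGood_fresh {k : Nat} {d : PySem.Dict String (List Int)} (hg : pvGood k d)
    {j : Nat} (hj : k < j) : d.contains (pileKey (j : Int)) = false := by
  simp only [PySem.Dict.contains]
  rw [List.any_eq_false]
  intro p hp
  obtain ⟨i, h1, h2, h3⟩ := hg p hp
  rw [h3]
  simp only [beq_iff_eq]
  intro hkey
  have := pvPileKey_inj (by omega : (0:Int) ≤ i) (by omega : (0:Int) ≤ j) hkey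
  omega

theorem pvGood_insert {k : Nat} {d : PySem.Dict String (List Int)} (hg : pvGood k d)
    (hfresh : d.contains (pileKey ((k+1 : Nat) : Int)) = false) (v : List Int) :
    pvGood (k+1) (d.insert (pileKey ((k+1 : Nat) : Int)) v) := by
  intro s hs
  simp only [PySem.Dict.insert, hfresh, Bool.false_eq_true, if_false] at hs
  rw [List.mem_append] at hs
  rcases hs with h | h
  · exact pvGood_mono (by omega) hg s h
  · simp only [List.mem_singleton] at h
    exact ⟨k+1, by omega, by omega, by rw [h]⟩

theorem pvGood_spit_fresh {k : Nat} {d : PySem.Dict String (List Int)} (hg : pvGood k d) :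
    d.contains "spit" = false := by
  simp only [PySem.Dict.contains]
  rw [List.any_eq_false]
  intro p hp
  obtain ⟨i, _, _, h3⟩ := hg p hp
  rw [h3]
  simp only [beq_iff_eq]
  intro hkey
  exact pvSpit_ne_pileKey (i : Int) hkey.symm

theorem pvGood_buildD (sp : List (String × String)) :
    ∀ (fc : List (Option (String × String))) (k : Nat) (d : PySem.Dict String (List Int)),
    pvGood k d → pvGood (k + fc.length) (buildD sp fc k d) := by
  intro fc
  induction fc with
  | nil => intro k d hg; simpa [buildD] using hg
  | cons c fc ih =>
    intro k d hg
    match c with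
    | none =>
      have := ih (k+1) d (pvGood_mono (by omega) hg)
      simpa [buildD, Nat.add_comm, Nat.add_assoc, Nat.add_left_comm] using this
    | some c =>
      simp only [buildD]
      by_cases he : (hitsOf sp (rankValue.getD c.1 0)).isEmpty
      · simp only [he, if_true]
        have := ih (k+1) d (pvGood_mono (by omega) hg)
        simpa [Nat.add_comm, Nat.add_assoc, Nat.add_left_comm] using this
      · simp only [he, Bool.false_eq_true, if_false]
        have hfresh := pvGood_fresh hg (by omega : k < k+1)
        have := ih (k+1) (d.insert (pileKey ((k+1 : Nat) : Int)) (hitsOf sp (rankValue.getD c.1 0)))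
          (pvGood_insert hg hfresh _)
        simpa [Nat.add_comm, Nat.add_assoc, Nat.add_left_comm] using this

-- A's faceup loop computes buildD
theorem pvOuterA (sp : List (String × String)) :
    ∀ (fc : List (Option (String × String))) (k : Nat) (d : PySem.Dict String (List Int)),
    pvGood k d →
    (PySem.List.enumerate fc (k : Int)).foldl (fun d ic =>
      match ic.2 with
      | none => d
      | some card =>
        let card_val := rankValue.getD card.1 0
        (PySem.List.enumerate (svalsOf sp) 0).foldl (fun (d : PySem.Dict String (List Int)) (sv : Int × Int) =>
          if legalPlays card_val sv.2 then
            let key := pileKey (ic.1 + 1)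
            let d' := if d.contains key then d else d.insert key []
            d'.modify key [] (fun l => l ++ [sv.1 + 1])
          else d) d) d = buildD sp fc k d := by
  intro fc
  induction fc with
  | nil => intro k d _; simp [pvEnum_nil, buildD]
  | cons c fc ih =>
    intro k d hg
    rw [pvEnum_cons, List.foldl_cons]
    match c with
    | none =>
      simp only [buildD]
      have : ((k : Int) + 1) = ((k + 1 : Nat) : Int) := by push_cast; ring
      rw [this, ih (k+1) d (pvGood_mono (by omega) hg)]
    | some c =>
      simp only [buildD]
      have hfresh : d.contains (pileKey ((k : Int) + 1)) = false := by
        have : ((k : Int) + 1) = ((k + 1 : Nat) : Int) := by push_cast; ring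
        rw [this]
        exact pvGood_fresh hg (by omega : k < k + 1)
      rw [pvInnerA_fresh (rankValue.getD c.1 0) (pileKey ((k : Int) + 1)) _ d hfresh]
      have hshift : ((PySem.List.enumerate (svalsOf sp) 0).filter
            (fun sv => legalPlays (rankValue.getD c.1 0) sv.2)).map (fun sv => sv.1 + 1) =
          hitsOf sp (rankValue.getD c.1 0) := by
        have := pvEnum_shift (fun v => legalPlays (rankValue.getD c.1 0) v) (svalsOf sp) 0
        simpa [hitsOf] using this
      simp only [hshift]
      have hcast : ((k : Int) + 1) = ((k + 1 : Nat) : Int) := by push_cast; ring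
      by_cases he : (hitsOf sp (rankValue.getD c.1 0)).isEmpty
      · simp only [he, if_true]
        have : ((k : Int) + 1) = ((k + 1 : Nat) : Int) := by push_cast; ring
        rw [this, ih (k+1) d (pvGood_mono (by omega) hg)]
      · simp only [he, Bool.false_eq_true, if_false, hcast]
        rw [ih (k+1) _ (pvGood_insert hg (hcast ▸ hfresh) _)]

-- B's faceup loop computes buildD
theorem pvOuterB0 (sp : List (String × String)) :
    ∀ (fc : List (Option (String × String))) (k : Nat) (d : PySem.Dict String (List Int)),
    (PySem.List.enumerate fc ((k : Int) + 1)).foldl (fun d ic =>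
      match ic.2 with
      | none => d
      | some card =>
        let idxs := hitsOf sp (rankValue.getD card.1 0)
        if idxs.isEmpty then d else d.insert (pileKey ic.1) idxs) d = buildD sp fc k d := by
  intro fc
  induction fc with
  | nil => intro k d; simp [pvEnum_nil, buildD]
  | cons c fc ih =>
    intro k d
    rw [pvEnum_cons, List.foldl_cons]
    have hcast : ((k : Int) + 1 + 1) = (((k + 1 : Nat) : Int) + 1) := by push_cast; ring
    match c with
    | none =>
      simp only [buildD]
      rw [hcast, ih (k+1) d]
    | some c =>
      simp only [buildD]
      have hcast2 : ((k : Int) + 1) = ((k + 1 : Nat) : Int) := by push_cast; ring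
      rw [hcast, hcast2, ih (k+1)]

theorem pvOuterB (sp : List (String × String)) :
    ∀ (fc : List (Option (String × String))) (k : Nat) (d : PySem.Dict String (List Int)),
    (PySem.List.enumerate fc ((k : Int) + 1)).foldl (fun d ic =>
      match ic.2 with
      | none => d
      | some card =>
        let idxs := PySem.List.sorted ((targetsOf (rankValue.getD card.1 0)).flatMap
          (fun t => (byValueOf sp).getD t [])) id
        if idxs.isEmpty then d else d.insert (pileKey ic.1) idxs) d = buildD sp fc k d := by
  intro fc k d
  rw [PySem.List.foldl_congr_mem _ _ (fun (d : PySem.Dict String (List Int)) (ic : Int × Option (String × String)) =>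
      match ic.2 with
      | none => d
      | some card =>
        let idxs := hitsOf sp (rankValue.getD card.1 0)
        if idxs.isEmpty then d else d.insert (pileKey ic.1) idxs) d
    (by
      intro acc ic _
      rcases hic : ic.2 with _ | card <;> simp only [hic, pvGather_eq])]
  exact pvOuterB0 sp fc k d

-- ===== VERDICT (by name: the statement is the Claim_ definition above) =====
theorem playable_cards_spec : Claim_equal_playable_cards := by
  intro sp fc ts _hdom _hpre
  unfold Spec_playable_cards
  show playable_cards sp fc ts = playable_cards_alt sp fc ts
  unfold playable_cards playable_cards_alt
  simp only []
  rw [show sp.map (fun card => rankValue.getD card.1 0) = svalsOf sp from rfl]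
  have hgood0 : pvGood 0 (PySem.Dict.empty : PySem.Dict String (List Int)) := by
    intro s hs
    simp [PySem.Dict.empty] at hs
  have hA := pvOuterA sp fc 0 PySem.Dict.empty hgood0
  have hB := pvOuterB sp fc 0 PySem.Dict.empty
  simp only [Nat.cast_zero] at hA
  simp only [Nat.cast_zero, zero_add] at hB
  rw [show (PySem.List.enumerate sp 1).foldl
        (fun (d : PySem.Dict Int (List Int)) (p : Int × (String × String)) =>
          d.modify (rankValue.getD p.2.1 0) [] (fun l => l ++ [p.1])) PySem.Dict.empty = byValueOf sp from rfl]
  rw [hA, hB]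
  have hgood : pvGood fc.length (buildD sp fc 0 PySem.Dict.empty) := by
    have := pvGood_buildD sp fc 0 PySem.Dict.empty hgood0
    simpa using this
  match ts with
  | none => rfl
  | some tc =>
    simp only []
    congr 1
    rw [pvInnerA_fresh (rankValue.getD tc.1 0) "spit" _ _ (pvGood_spit_fresh hgood)]
    have hshift : ((PySem.List.enumerate (svalsOf sp) 0).filter
          (fun sv => legalPlays (rankValue.getD tc.1 0) sv.2)).map (fun sv => sv.1 + 1) =
        hitsOf sp (rankValue.getD tc.1 0) := by
      have := pvEnum_shift (fun v => legalPlays (rankValue.getD tc.1 0) v) (svalsOf sp) 0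
      simpa [hitsOf] using this
    simp only [hshift, pvGather_eq]
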